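-- pv_equiv track=rewrite | github.com/mhatredakshay/script- | irage/sorting4.py | find_names
-- ===== SOURCE A (Python) =====
-- def find_names(names, match_words):
--     """Finds all names in the list that match the given words, case-insensitive.
--
--     Args:
--       names: A list of strings.
--       match_words: A list of strings.
--
--     Returns:
--       A list of strings that match the given words.
--     """
--     matched_names = []
--     for name in names:
--         name_parts = name.split('.')  # Split the name by dot
--         first_name = name_parts[0].strip() if len(name_parts) > 0 else ""
--         last_initial = name_parts[1][0].strip() if len(name_parts) > 1 and len(name_parts[1]) > 0 else ""
--
--         for match_word in match_words:
--             first_word = match_word.split()[0]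
--             last_word = match_word.split()[-1] if len(match_word.split()) > 1 else ""
--
--             # Check for a match based on your criteria
--             if (first_name.lower() == first_word.lower()) and (last_word == "" or last_initial.lower() == last_word[0].lower()):
--                 matched_names.append(name)
--                 break
--
--     return matched_names
-- ===== SOURCE B (Python) =====
-- def find_names(names, match_words):
--     # Build an index once: lowered first word -> None (wildcard: no last word)
--     # or the set of lowered last-word initials; then each name is one O(1) lookup.
--     index = {}
--     for word in match_words:
--         parts = word.split()
--         first = parts[0].lower()
--         if len(parts) > 1:
--             init = parts[-1][0].lower()
--             if first in index:
--                 cur = index[first]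
--                 if cur is not None:
--                     cur.add(init)
--             else:
--                 index[first] = {init}
--         else:
--             index[first] = None  # matches any last initial
--     result = []
--     for name in names:
--         name_parts = name.split('.')
--         first_name = name_parts[0].strip().lower()
--         last_initial = name_parts[1][0].strip().lower() if len(name_parts) > 1 and len(name_parts[1]) > 0 else ""
--         if first_name in index:
--             v = index[first_name]
--             if v is None or last_initial in v:
--                 result.append(name)
--     return result
-- ===== Notes on version B (the rewrite author's own statement) =====
-- stated objective: faster
-- what changed: A scans all match_words for every name (with repeated re-splitting of each match word); B builds a dictionary index over match_words once (lowered first word -> wildcard marker or set of lowered last-word initials) and then decides each name with a single hash lookup.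
-- outside the precondition, e.g. on find_names(['ann'], ['ann', ' ']): A returns ['ann'], B raises IndexError
import Mathlib
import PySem

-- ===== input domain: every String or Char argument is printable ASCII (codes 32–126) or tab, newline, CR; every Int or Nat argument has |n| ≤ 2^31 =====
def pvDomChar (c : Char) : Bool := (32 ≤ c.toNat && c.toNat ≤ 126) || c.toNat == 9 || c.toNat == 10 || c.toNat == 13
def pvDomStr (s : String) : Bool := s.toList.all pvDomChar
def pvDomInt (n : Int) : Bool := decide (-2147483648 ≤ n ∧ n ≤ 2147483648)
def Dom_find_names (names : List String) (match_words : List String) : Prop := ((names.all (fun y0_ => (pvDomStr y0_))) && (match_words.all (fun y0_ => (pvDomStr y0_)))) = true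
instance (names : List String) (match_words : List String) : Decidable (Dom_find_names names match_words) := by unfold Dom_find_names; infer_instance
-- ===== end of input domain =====

-- B replaces A's per-name scan over match_words by a dictionary index built once
-- (lowered first word -> wildcard or set of lowered last-word initials); objective: faster.

-- ===== PORT A =====

-- body of A's inner `for match_word in match_words` test for one match_word
def pvAWordMatch (first_name last_initial : String) (match_word : String) : Bool :=
  let ws := PySem.Str.split₀ match_word
  let first_word := (PySem.List.pyGet? ws 0).getD ""   -- match_word.split()[0]; getD "" = IndexError branch, outside Pre_
  let last_word := if ws.length > 1 then (PySem.List.pyGet? ws (-1)).getD "" else ""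
  (PySem.Str.lower first_name == PySem.Str.lower first_word) &&
    (last_word == "" ||
      PySem.Str.lower last_initial ==
        (match PySem.Str.pyGet? last_word 0 with   -- last_word[0].lower(); "" = IndexError branch, unreachable
         | some c => String.ofList [PySem.Chars.lowerChar c]
         | none => ""))

-- A's inner loop with its `break`: stop at the first matching match_word
def pvAInner (first_name last_initial : String) : List String → Bool
  | [] => false
  | w :: rest =>
    if pvAWordMatch first_name last_initial w then true
    else pvAInner first_name last_initial rest

def find_names (names : List String) (match_words : List String) : List String :=
  names.foldl (fun matched_names name =>
    let name_parts := (PySem.Str.split? name ".").getD []   -- sep "." ≠ "", never none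
    let first_name := if name_parts.length > 0 then PySem.Str.strip ((PySem.List.pyGet? name_parts 0).getD "") else ""
    let part1 := (PySem.List.pyGet? name_parts 1).getD ""
    let last_initial :=
      if name_parts.length > 1 && PySem.Str.len part1 > 0 then
        match PySem.Str.pyGet? part1 0 with   -- name_parts[1][0].strip()
        | some c => PySem.Str.strip (String.ofList [c])
        | none => ""
      else ""
    if pvAInner first_name last_initial match_words then matched_names ++ [name]
    else matched_names) []

-- ===== PORT B =====

-- Source B: parts[-1][0].lower() — first character, lowered, as a 1-char string ("" = IndexError
-- branch, which Pre_ keeps unreachable)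
def pvBCharLower (s : String) : String :=
  match PySem.Str.pyGet? s 0 with
  | some c => String.ofList [PySem.Chars.lowerChar c]
  | none => ""

-- Source B: one step of the index-building loop over match_words
def pvBStep (index : PySem.Dict String (Option (PySem.Set String))) (word : String) :
    PySem.Dict String (Option (PySem.Set String)) :=
  let parts := PySem.Str.split₀ word
  let first := PySem.Str.lower ((PySem.List.pyGet? parts 0).getD "")   -- parts[0].lower()
  if parts.length > 1 then
    let init := pvBCharLower ((PySem.List.pyGet? parts (-1)).getD "")
    match index.get? first with
    | some cur =>
      match cur with
      | some s => index.insert first (some (PySem.Set.add s init))   -- cur.add(init) in place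
      | none => index                                                -- wildcard absorbs
    | none => index.insert first (some (PySem.Set.ofList [init]))
  else
    index.insert first none   -- wildcard: matches any last initial

def find_names_alt (names : List String) (match_words : List String) : List String :=
  let index := match_words.foldl pvBStep PySem.Dict.empty
  names.foldl (fun result name =>
    let name_parts := (PySem.Str.split? name ".").getD []
    let first_name := PySem.Str.lower (PySem.Str.strip ((PySem.List.pyGet? name_parts 0).getD ""))
    let part1 := (PySem.List.pyGet? name_parts 1).getD ""
    let last_initial :=
      if name_parts.length > 1 && PySem.Str.len part1 > 0 then
        PySem.Str.lower (match PySem.Str.pyGet? part1 0 with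
          | some c => PySem.Str.strip (String.ofList [c])
          | none => "")
      else ""
    match index.get? first_name with
    | some v =>
      if (match v with
          | none => true
          | some s => PySem.Set.contains s last_initial) then result ++ [name]
      else result
    | none => result) []

-- ===== PRECONDITION & SPEC =====

-- Pre_ excludes match_words containing a whitespace-only word: match_word.split()[0] raises
-- IndexError on them whenever A's inner loop reaches such a word (it always does unless every
-- name matches an earlier word first, an artefact of A's lazy inner loop), and B, which
-- indexes every match_word up front, raises IndexError on all of them.
def Pre_find_names (names : List String) (match_words : List String) : Prop :=
  ∀ w ∈ match_words, PySem.Str.strip w ≠ ""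
instance (names : List String) (match_words : List String) : Decidable (Pre_find_names names match_words) := by unfold Pre_find_names; infer_instance

def pvWitness_find_names : List String × List String :=
  (["John.Smith", "ann.k", "Bob"], ["john s", "ann", "bob x"])

def Spec_find_names (names : List String) (match_words : List String) (out : List String) : Prop := out = find_names_alt names match_words
instance (names : List String) (match_words : List String) (out : List String) : Decidable (Spec_find_names names match_words out) := by unfold Spec_find_names; infer_instance

-- ===== CLAIM (what is proved, stated in full; the proofs are below) =====
def Claim_equal_find_names : Prop := ∀ (names : List String) (match_words : List String), Dom_find_names names match_words → Pre_find_names names match_words → Spec_find_names names match_words (find_names names match_words)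

-- ===== LEMMAS AND PROOFS =====

-- the key of a match_word (lowered first token), its wildcard flag, and its lowered last initial
def pvKey (w : String) : String := PySem.Str.lower ((PySem.List.pyGet? (PySem.Str.split₀ w) 0).getD "")
def pvWild (w : String) : Bool := !((PySem.Str.split₀ w).length > 1)
def pvInit (w : String) : String := pvBCharLower ((PySem.List.pyGet? (PySem.Str.split₀ w) (-1)).getD "")

-- what the index answers for a (lowered) first name / last initial
def pvLook (index : PySem.Dict String (Option (PySem.Set String))) (fn li : String) : Bool :=
  match index.get? fn with
  | none => false
  | some none => true
  | some (some s) => PySem.Set.contains s li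

-- tokens produced by str.split() are never empty (invariant of split₀'s accumulator loop)
theorem split₀_go_ne_nil : ∀ (l cur : List Char) (acc : List (List Char)),
    (∀ t ∈ acc, t ≠ []) → ∀ t ∈ PySem.Chars.split₀.go l cur acc, t ≠ [] := by
  intro l
  induction l with
  | nil =>
    intro cur acc hacc t ht
    simp only [PySem.Chars.split₀.go] at ht
    split at ht
    · exact hacc t (List.mem_reverse.mp ht)
    · next hne =>
      rcases List.mem_cons.mp (List.mem_reverse.mp ht) with h | h
      · subst h; simpa [List.isEmpty_iff] using hne
      · exact hacc t h
  | cons c rest ih =>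
    intro cur acc hacc t ht
    simp only [PySem.Chars.split₀.go] at ht
    split at ht
    · split at ht
      · exact ih [] acc hacc t ht
      · next hne =>
        refine ih [] _ ?_ t ht
        intro u hu
        rcases List.mem_cons.mp hu with h | h
        · subst h; simpa [List.isEmpty_iff] using hne
        · exact hacc u h
    · exact ih (c :: cur) acc hacc t ht

theorem split₀_tok_ne (w t : String) (ht : t ∈ PySem.Str.split₀ w) : t ≠ "" := by
  simp only [PySem.Str.split₀, List.mem_map] at ht
  obtain ⟨l, hl, rfl⟩ := ht
  have hne : l ≠ [] := split₀_go_ne_nil _ _ _ (by simp) l hl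
  intro h
  apply hne
  simpa using congrArg String.toList h

-- A's per-word test, rephrased through pvKey/pvWild/pvInit
theorem wordMatch_eq (fn li w : String) :
    pvAWordMatch fn li w =
      ((PySem.Str.lower fn == pvKey w) &&
        (pvWild w || PySem.Str.lower li == pvInit w)) := by
  unfold pvAWordMatch pvKey pvWild pvInit pvBCharLower
  by_cases hlen : (PySem.Str.split₀ w).length > 1
  · have hne : PySem.Str.split₀ w ≠ [] := by
      intro h; rw [h] at hlen; simp at hlen
    have hlast : PySem.List.pyGet? (PySem.Str.split₀ w) (-1) = some ((PySem.Str.split₀ w).getLast hne) := by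
      rw [PySem.List.pyGet?_neg_one, List.getLast?_eq_some_getLast]
    have hlne : (PySem.Str.split₀ w).getLast hne ≠ "" :=
      split₀_tok_ne w _ (List.getLast_mem hne)
    have hbeq : ((PySem.Str.split₀ w).getLast hne == "") = false := by simpa using hlne
    simp only [hlen, if_true, hlast, Option.getD_some]
    simp [hbeq]
  · simp [hlen]

-- Source B's "seen key" update, factored out for the case analysis
def pvAddInit (index : PySem.Dict String (Option (PySem.Set String))) (k i : String) :
    PySem.Dict String (Option (PySem.Set String)) :=
  match index.get? k with
  | some (some s) => index.insert k (some (PySem.Set.add s i))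
  | some none => index
  | none => index.insert k (some (PySem.Set.ofList [i]))

theorem step_eq (index : PySem.Dict String (Option (PySem.Set String))) (w : String) :
    pvBStep index w =
      (if pvWild w then index.insert (pvKey w) none else pvAddInit index (pvKey w) (pvInit w)) := by
  unfold pvBStep pvAddInit pvKey pvWild pvInit
  by_cases hlen : (PySem.Str.split₀ w).length > 1
  · simp only [hlen, decide_true, Bool.not_true, if_true, if_false, Bool.false_eq_true]
    cases index.get? (PySem.Str.lower ((PySem.List.pyGet? (PySem.Str.split₀ w) 0).getD "")) with
    | none => rfl
    | some cur => cases cur <;> rfl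
  · simp [hlen]

theorem look_insert_none (index : PySem.Dict String (Option (PySem.Set String))) (k fn li : String) :
    pvLook (index.insert k none) fn li = (pvLook index fn li || fn == k) := by
  unfold pvLook
  by_cases hfk : fn = k
  · subst hfk; simp [PySem.Dict.get?_insert]
  · simp only [PySem.Dict.get?_insert, if_neg hfk]
    simp [hfk]

theorem look_addInit (index : PySem.Dict String (Option (PySem.Set String))) (k i fn li : String) :
    pvLook (pvAddInit index k i) fn li = (pvLook index fn li || (fn == k && li == i)) := by
  unfold pvLook pvAddInit
  by_cases hfk : fn = k
  · subst hfk
    cases hg : index.get? fn with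
    | none => (rw [Bool.eq_iff_iff]; simp [PySem.Set.mem_ofList])
    | some cur =>
      cases cur with
      | none => simp [hg]
      | some s => (rw [Bool.eq_iff_iff]; simp [PySem.Set.mem_add])
  · cases hg : index.get? k with
    | none =>
      simp only [hg, PySem.Dict.get?_insert, if_neg hfk]
      simp [hfk]
    | some cur =>
      cases cur with
      | none => simp [hg, hfk]
      | some s =>
        simp only [hg, PySem.Dict.get?_insert, if_neg hfk]
        simp [hfk]

-- one index step adds exactly one word's matches
theorem look_step (index : PySem.Dict String (Option (PySem.Set String))) (w fn li : String) :
    pvLook (pvBStep index w) fn li =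
      (pvLook index fn li || ((fn == pvKey w) && (pvWild w || li == pvInit w))) := by
  rw [step_eq]
  by_cases hwild : pvWild w
  · simp [hwild, look_insert_none]
  · simp only [hwild, if_false, Bool.false_eq_true, look_addInit]
    simp [hwild]

-- the whole index answers the existential over match_words
theorem look_foldl (mws : List String) (index : PySem.Dict String (Option (PySem.Set String))) (fn li : String) :
    pvLook (mws.foldl pvBStep index) fn li =
      (pvLook index fn li || mws.any (fun w => (fn == pvKey w) && (pvWild w || li == pvInit w))) := by
  induction mws generalizing index with
  | nil => simp
  | cons w rest ih => simp [List.foldl_cons, ih, look_step, Bool.or_assoc]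

-- A's inner loop is the same existential
theorem inner_eq_any (fn li : String) (mws : List String) :
    pvAInner fn li mws = mws.any (fun w => pvAWordMatch fn li w) := by
  induction mws with
  | nil => rfl
  | cons w rest ih => simp [pvAInner, ih]

-- A's inner loop = one lookup in the finished index (on the lowered name fields)
theorem inner_eq_look (mws : List String) (fn li : String) :
    pvAInner fn li mws =
      pvLook (mws.foldl pvBStep PySem.Dict.empty) (PySem.Str.lower fn) (PySem.Str.lower li) := by
  rw [inner_eq_any, look_foldl]
  have hempty : pvLook PySem.Dict.empty (PySem.Str.lower fn) (PySem.Str.lower li) = false := by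
    simp [pvLook, PySem.Dict.get?_empty]
  rw [hempty, Bool.false_or]
  simp only [wordMatch_eq]

-- B's per-name match on the lookup, as an if on pvLook
theorem bmatch_eq (idx : PySem.Dict String (Option (PySem.Set String))) (fn li : String)
    (acc : List String) (name : String) :
    (match idx.get? fn with
     | some v =>
       if (match v with
           | none => true
           | some s => PySem.Set.contains s li) then acc ++ [name]
       else acc
     | none => acc) = if pvLook idx fn li then acc ++ [name] else acc := by
  unfold pvLook
  cases idx.get? fn with
  | none => simp
  | some v => cases v <;> simp

-- pointwise equal fold bodies give equal folds
theorem foldl_ext {α β : Type} (f g : α → β → α) (h : ∀ a b, f a b = g a b) :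
    ∀ (l : List β) (a : α), l.foldl f a = l.foldl g a := by
  intro l
  induction l with
  | nil => intro a; rfl
  | cons x xs ih => intro a; rw [List.foldl_cons, List.foldl_cons, h, ih]

-- A's first_name, lowered, is B's first_name (the length guard is vacuous for [])
theorem fn_eq (parts : List String) :
    PySem.Str.lower (if parts.length > 0 then PySem.Str.strip ((PySem.List.pyGet? parts 0).getD "") else "") =
      PySem.Str.lower (PySem.Str.strip ((PySem.List.pyGet? parts 0).getD "")) := by
  cases parts with
  | nil => simp [PySem.List.pyGet?, PySem.List.pyIdx?]; decide
  | cons p rest => simp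

-- A's last_initial, lowered, is B's last_initial
theorem li_eq (parts : List String) (part1 : String) :
    PySem.Str.lower (if parts.length > 1 && PySem.Str.len part1 > 0 then
        (match PySem.Str.pyGet? part1 0 with
         | some c => PySem.Str.strip (String.ofList [c])
         | none => "")
      else "") =
      (if parts.length > 1 && PySem.Str.len part1 > 0 then
        PySem.Str.lower (match PySem.Str.pyGet? part1 0 with
          | some c => PySem.Str.strip (String.ofList [c])
          | none => "")
      else "") := by
  split
  · rfl
  · decide

-- ===== VERDICT (by name: the statement is the Claim_ definition above) =====
theorem find_names_spec : Claim_equal_find_names := by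
  intro names match_words _ _
  unfold Spec_find_names find_names find_names_alt
  refine foldl_ext _ _ ?_ names []
  intro acc name
  simp only
  rw [bmatch_eq, ← fn_eq, ← li_eq, ← inner_eq_look]
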